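-- pv_equiv track=rewrite | github.com/AlexanderGitHubTest/ASD2 | 05_generate_bbst_array.py/generate_bbst_array.py | GenerateBBSTArray_recursion
-- ===== SOURCE A (Python) =====
-- def GenerateBBSTArray_recursion(a, step, result_array):
--     indentation_of_first_element = (step - 1) // 2
--     for element_id in range(indentation_of_first_element, len(a), step):
--         result_array.append(a[element_id])
--     if indentation_of_first_element == 0:
--         return result_array
--     next_step = (step + 1) // 2
--     return GenerateBBSTArray_recursion(a, next_step, result_array)
-- ===== SOURCE B (Python) =====
-- def GenerateBBSTArray_recursion(a, step, result_array):
--     # Two phases: first compute the whole schedule of step widths,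
--     # then emit every level with one extend.  Mutates result_array like A.
--     steps = [step]
--     while (steps[-1] - 1) // 2 != 0:
--         steps.append((steps[-1] + 1) // 2)
--     for s in steps:
--         result_array.extend(a[i] for i in range((s - 1) // 2, len(a), s))
--     return result_array
-- ===== Notes on version B (the rewrite author's own statement) =====
-- stated objective: alternative
-- what changed: Replaces A's tail recursion by two phases: an iterative loop first materialises the whole schedule of step widths, then a single pass extends the result with each level's elements.
import Mathlib
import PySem

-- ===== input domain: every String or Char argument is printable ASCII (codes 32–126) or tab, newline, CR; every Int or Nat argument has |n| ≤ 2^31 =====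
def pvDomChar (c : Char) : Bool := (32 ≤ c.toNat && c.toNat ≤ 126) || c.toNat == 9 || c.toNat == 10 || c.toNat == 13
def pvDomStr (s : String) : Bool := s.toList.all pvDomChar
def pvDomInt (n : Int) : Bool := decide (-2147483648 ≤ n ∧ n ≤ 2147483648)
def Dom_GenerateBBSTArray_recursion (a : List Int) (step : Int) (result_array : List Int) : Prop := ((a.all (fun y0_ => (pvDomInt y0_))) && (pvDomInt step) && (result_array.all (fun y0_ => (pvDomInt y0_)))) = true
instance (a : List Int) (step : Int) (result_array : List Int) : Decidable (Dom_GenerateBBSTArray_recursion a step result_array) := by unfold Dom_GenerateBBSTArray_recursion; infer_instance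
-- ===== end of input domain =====

-- B replaces A's tail recursion by two iterative phases (schedule of steps, then one emitting pass);
-- equal return value on step ≥ 1; like A, B mutates result_array in place (same appends, same object).

-- ===== PORT A =====
-- A's tail recursion, step for step.  a[element_id] is ported as pyGetD with default 0: under
-- Pre_ (step ≥ 1) every generated index satisfies 0 ≤ i < a.length, so this is exact there.
-- The '2 < step' guard only makes the recursion total: Python raises ValueError (range step 0)
-- on every input it cuts off, and those are outside Pre_.
def GenerateBBSTArray_recursion (a : List Int) (step : Int) (result_array : List Int) : List Int :=
  let indentation_of_first_element := PySem.Int.floordiv (step - 1) 2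
  let result_array :=
    (PySem.List.pyRange indentation_of_first_element a.length step).foldl
      (fun r element_id => r ++ [PySem.List.pyGetD a element_id 0]) result_array
  if indentation_of_first_element = 0 then result_array
  else if h : 2 < step then
    GenerateBBSTArray_recursion a (PySem.Int.floordiv (step + 1) 2) result_array
  else result_array
termination_by step.toNat
decreasing_by
  have : PySem.Int.floordiv (step + 1) 2 = (step + 1) / 2 := by
    rw [PySem.Int.floordiv, Int.fdiv_eq_ediv]; simp
  omega

-- ===== PORT B =====
-- Phase 1 of Source B: the while loop building the schedule of step widths.  The '2 < s' guard
-- only makes it total: the Python loop diverges exactly on the inputs it cuts off (s ≤ 0),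
-- all outside Pre_.
def bbstSteps (s : Int) : List Int :=
  s :: (if PySem.Int.floordiv (s - 1) 2 ≠ 0 ∧ 2 < s then bbstSteps (PySem.Int.floordiv (s + 1) 2) else [])
termination_by s.toNat
decreasing_by
  have : PySem.Int.floordiv (s + 1) 2 = (s + 1) / 2 := by
    rw [PySem.Int.floordiv, Int.fdiv_eq_ediv]; simp
  omega

-- Phase 2 of Source B: one extend per scheduled step.
def GenerateBBSTArray_recursion_alt (a : List Int) (step : Int) (result_array : List Int) : List Int :=
  (bbstSteps step).foldl
    (fun res s =>
      res ++ (PySem.List.pyRange (PySem.Int.floordiv (s - 1) 2) a.length s).map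
        (fun i => PySem.List.pyGetD a i 0))
    result_array

-- ===== PRECONDITION & SPEC =====
-- Pre_ excludes exactly step ≤ 0, where Python's A always raises ValueError (range() is
-- eventually called with step 0); Python's B diverges there.
def Pre_GenerateBBSTArray_recursion (a : List Int) (step : Int) (result_array : List Int) : Prop := 1 ≤ step
instance (a : List Int) (step : Int) (result_array : List Int) : Decidable (Pre_GenerateBBSTArray_recursion a step result_array) := by unfold Pre_GenerateBBSTArray_recursion; infer_instance
def pvWitness_GenerateBBSTArray_recursion : List Int × Int × List Int := ([1, 2, 3, 4, 5, 6, 7], 4, [])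

def Spec_GenerateBBSTArray_recursion (a : List Int) (step : Int) (result_array : List Int) (out : List Int) : Prop := out = GenerateBBSTArray_recursion_alt a step result_array
instance (a : List Int) (step : Int) (result_array : List Int) (out : List Int) : Decidable (Spec_GenerateBBSTArray_recursion a step result_array out) := by unfold Spec_GenerateBBSTArray_recursion; infer_instance

-- ===== CLAIM (what is proved, stated in full; the proofs are below) =====
def Claim_equal_GenerateBBSTArray_recursion : Prop := ∀ (a : List Int) (step : Int) (result_array : List Int), Dom_GenerateBBSTArray_recursion a step result_array → Pre_GenerateBBSTArray_recursion a step result_array → Spec_GenerateBBSTArray_recursion a step result_array (GenerateBBSTArray_recursion a step result_array)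

-- ===== LEMMAS AND PROOFS =====

theorem foldl_append_singleton {α β : Type} (g : β → α) (l : List β) (r : List α) :
    l.foldl (fun r i => r ++ [g i]) r = r ++ l.map g := by
  induction l generalizing r with
  | nil => simp
  | cons x xs ih => simp [List.foldl, ih]

theorem fdiv_two_eq (x : Int) : PySem.Int.floordiv x 2 = x / 2 := by
  rw [PySem.Int.floordiv, Int.fdiv_eq_ediv]; simp

theorem bbst_eq (a : List Int) (step : Int) (r : List Int) (h : 1 ≤ step) :
    GenerateBBSTArray_recursion a step r = GenerateBBSTArray_recursion_alt a step r := by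
  rw [GenerateBBSTArray_recursion, GenerateBBSTArray_recursion_alt, bbstSteps]
  have hlevel := foldl_append_singleton (fun i => PySem.List.pyGetD a i 0)
    (PySem.List.pyRange (PySem.Int.floordiv (step - 1) 2) a.length step) r
  simp only [fdiv_two_eq] at hlevel ⊢
  by_cases hind : (step - 1) / 2 = 0
  · rw [hind] at hlevel
    simp only [hind, if_neg (by simp : ¬ ((0:Int) ≠ 0 ∧ 2 < step))]
    simpa [List.foldl, hind] using hlevel
  · have h3 : 2 < step := by
      by_contra hle
      exact hind (by omega)
    simp only [if_neg hind, if_pos (And.intro hind h3), dif_pos h3]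
    have hnext : 1 ≤ (step + 1) / 2 := by omega
    rw [bbst_eq a _ _ hnext, GenerateBBSTArray_recursion_alt, hlevel]
    simp only [fdiv_two_eq]
    simp [List.foldl]
termination_by step.toNat
decreasing_by
  have : PySem.Int.floordiv (step + 1) 2 = (step + 1) / 2 := fdiv_two_eq _
  omega

-- ===== VERDICT (by name: the statement is the Claim_ definition above) =====
theorem GenerateBBSTArray_recursion_spec : Claim_equal_GenerateBBSTArray_recursion := by
  intro a step r _ hpre
  exact bbst_eq a step r hpre
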